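-- pv_equiv track=rewrite | github.com/YueMiyuki/picoctf_writeups | secure-email-service/src/mt_solve.py | predict_after
-- ===== SOURCE A (Python) =====
-- def temper(x):
--     y = x & 0xFFFFFFFF
--     y ^= (y >> 11)
--     y ^= (y << 7) & 0x9D2C5680
--     y ^= (y << 15) & 0xEFC60000
--     y ^= (y >> 18)
--     return y
--
-- def twist(state):
--     s = list(state)
--     for i in range(624):
--         y = (s[i] & 0x80000000) | (s[(i + 1) % 624] & 0x7FFFFFFF)
--         s[i] = s[(i + 397) % 624] ^ (y >> 1) ^ (0x9908B0DF if y & 1 else 0)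
--     return s
--
-- def predict_after(mt_state, n_consumed, count=1):
--     genrand_consumed = n_consumed * 2
--     periods = genrand_consumed // 624
--     remainder = genrand_consumed % 624
--
--     state = list(mt_state)
--     for _ in range(periods):
--         state = twist(state)
--
--     idx = remainder
--     results = []
--     for _ in range(count):
--         if idx >= 624:
--             state = twist(state)
--             idx = 0
--         w0 = temper(state[idx]); idx += 1
--         if idx >= 624:
--             state = twist(state)
--             idx = 0
--         w1 = temper(state[idx]); idx += 1
--         results.append(w0 | ((w1 >> 1) << 32))
--     return results
-- ===== SOURCE B (Python) =====
-- # B: no cursor, no boundary checks -- precompute the table of twisted state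
-- # blocks, then read every output word by pure index arithmetic (block p//624,
-- # offset p%624), pairing words directly per result.
--
-- def temper(x):
--     y = x & 0xFFFFFFFF
--     y ^= (y >> 11)
--     y ^= (y << 7) & 0x9D2C5680
--     y ^= (y << 15) & 0xEFC60000
--     y ^= (y >> 18)
--     return y
--
-- def twist(state):
--     s = list(state)
--     for i in range(624):
--         y = (s[i] & 0x80000000) | (s[(i + 1) % 624] & 0x7FFFFFFF)
--         s[i] = s[(i + 397) % 624] ^ (y >> 1) ^ (0x9908B0DF if y & 1 else 0)
--     return s
--
-- def predict_after(mt_state, n_consumed, count=1):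
--     genrand = n_consumed * 2
--     periods = genrand // 624
--     start = genrand % 624
--
--     state = list(mt_state)
--     for _ in range(periods):
--         state = twist(state)
--
--     # block table: blocks[k] is the state after k further twists; word p lives
--     # at blocks[p // 624][p % 624] (positions start .. start + 2*count - 1)
--     nb = (start + 2 * count - 1) // 624 if count > 0 else 0
--     blocks = [state]
--     for _ in range(nb):
--         blocks.append(twist(blocks[-1]))
--
--     def word(p):
--         return temper(blocks[p // 624][p % 624])
--
--     return [word(start + 2 * i) | ((word(start + 2 * i + 1) >> 1) << 32)
--             for i in range(count)]
-- ===== Notes on version B (the rewrite author's own statement) =====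
-- stated objective: alternative
-- what changed: A's stateful cursor with duplicated twist-at-624 boundary checks inside the result loop is replaced by a precomputed table of twisted state blocks; each output word is then read by pure index arithmetic (block p//624, offset p%624) with no cursor and no boundary checks.
import Mathlib
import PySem

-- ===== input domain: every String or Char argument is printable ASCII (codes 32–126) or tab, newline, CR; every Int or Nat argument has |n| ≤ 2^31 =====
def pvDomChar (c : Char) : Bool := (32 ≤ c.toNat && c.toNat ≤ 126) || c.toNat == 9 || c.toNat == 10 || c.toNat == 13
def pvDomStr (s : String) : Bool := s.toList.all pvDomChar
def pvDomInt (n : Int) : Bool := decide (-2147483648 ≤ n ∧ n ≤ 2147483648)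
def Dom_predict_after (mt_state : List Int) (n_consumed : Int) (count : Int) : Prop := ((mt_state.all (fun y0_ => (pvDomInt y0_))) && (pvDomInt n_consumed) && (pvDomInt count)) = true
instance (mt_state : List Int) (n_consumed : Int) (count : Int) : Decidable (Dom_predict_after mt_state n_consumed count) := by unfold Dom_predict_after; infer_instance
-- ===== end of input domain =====

set_option maxRecDepth 8192


-- B replaces A's stateful cursor with its duplicated twist-at-624 checks by a precomputed
-- table of twisted state blocks read purely by index arithmetic (objective: alternative).

-- ===== PORT A =====
-- shared module-level helpers of both Pythons
def pyTemper (x : Int) : Int :=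
  let y := PySem.Int.band x 0xFFFFFFFF
  let y := PySem.Int.bxor y (y >>> 11)
  let y := PySem.Int.bxor y (PySem.Int.band (y <<< 7) 0x9D2C5680)
  let y := PySem.Int.bxor y (PySem.Int.band (y <<< 15) 0xEFC60000)
  let y := PySem.Int.bxor y (y >>> 18)
  y

def pyTwist (state : List Int) : List Int :=
  (List.range 624).foldl (fun s i =>
    let y := PySem.Int.bor (PySem.Int.band (s.getD i 0) 0x80000000) (PySem.Int.band (s.getD ((i + 1) % 624) 0) 0x7FFFFFFF)
    s.set i (PySem.Int.bxor (PySem.Int.bxor (s.getD ((i + 397) % 624) 0) (y >>> 1)) (if PySem.Int.band y 1 ≠ 0 then 0x9908B0DF else 0)))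
    state

-- A's per-result loop: a cursor idx, two index-checked fetches per iteration, one result appended
def predictLoopA : Nat → List Int → Nat → List Int → List Int
  | 0, _, _, results => results
  | n + 1, state, idx, results =>
    let p1 := if 624 ≤ idx then (pyTwist state, (0 : Nat)) else (state, idx)
    let w0 := pyTemper (p1.1.getD p1.2 0)
    let p2 := if 624 ≤ p1.2 + 1 then (pyTwist p1.1, (0 : Nat)) else (p1.1, p1.2 + 1)
    let w1 := pyTemper (p2.1.getD p2.2 0)
    predictLoopA n p2.1 (p2.2 + 1) (results ++ [PySem.Int.bor w0 ((w1 >>> 1) <<< 32)])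

def predict_after (mt_state : List Int) (n_consumed : Int) (count : Int) : List Int :=
  let genrand := n_consumed * 2
  let periods := PySem.Int.floordiv genrand 624
  let remainder := PySem.Int.mod genrand 624
  let state := (List.range periods.toNat).foldl (fun s _ => pyTwist s) mt_state
  predictLoopA count.toNat state remainder.toNat []

-- ===== PORT B =====
-- blocks.append(twist(blocks[-1])) repeated nb times (all indices below are
-- nonnegative Python ints, so Nat division/mod is exact here)
def blockTableB (nb : Nat) (st : List Int) : List (List Int) :=
  (List.range nb).foldl (fun bs _ => bs ++ [pyTwist (bs.getLastD [])]) [st]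

-- word(p) = temper(blocks[p // 624][p % 624])
def wordB (blocks : List (List Int)) (p : Nat) : Int :=
  pyTemper ((blocks.getD (p / 624) []).getD (p % 624) 0)

def predict_after_alt (mt_state : List Int) (n_consumed : Int) (count : Int) : List Int :=
  let genrand := n_consumed * 2
  let periods := PySem.Int.floordiv genrand 624
  let start := (PySem.Int.mod genrand 624).toNat
  let state := (List.range periods.toNat).foldl (fun s _ => pyTwist s) mt_state
  let nb := if 0 < count then (start + 2 * count.toNat - 1) / 624 else 0
  let blocks := blockTableB nb state
  (List.range count.toNat).map (fun i =>
    PySem.Int.bor (wordB blocks (start + 2 * i)) ((wordB blocks (start + 2 * i + 1) >>> 1) <<< 32))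

-- ===== PRECONDITION & SPEC =====
-- Pre_ excludes exactly the inputs on which Python A raises IndexError: a state shorter
-- than 624 words combined with either a positive number of twists or fetches reaching
-- past the end of the state.
def Pre_predict_after (mt_state : List Int) (n_consumed : Int) (count : Int) : Prop :=
  624 ≤ mt_state.length ∨
    (PySem.Int.floordiv (n_consumed * 2) 624 ≤ 0 ∧
      (count ≤ 0 ∨ PySem.Int.mod (n_consumed * 2) 624 + 2 * count ≤ mt_state.length))
instance (mt_state : List Int) (n_consumed : Int) (count : Int) : Decidable (Pre_predict_after mt_state n_consumed count) := by unfold Pre_predict_after; infer_instance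

def pvWitness_predict_after : List Int × Int × Int := ([], 0, 0)

def Spec_predict_after (mt_state : List Int) (n_consumed : Int) (count : Int) (out : List Int) : Prop := out = predict_after_alt mt_state n_consumed count
instance (mt_state : List Int) (n_consumed : Int) (count : Int) (out : List Int) : Decidable (Spec_predict_after mt_state n_consumed count out) := by unfold Spec_predict_after; infer_instance

-- ===== CLAIM (what is proved, stated in full; the proofs are below) =====
def Claim_equal_predict_after : Prop := ∀ (mt_state : List Int) (n_consumed : Int) (count : Int), Dom_predict_after mt_state n_consumed count → Pre_predict_after mt_state n_consumed count → Spec_predict_after mt_state n_consumed count (predict_after mt_state n_consumed count)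

-- ===== LEMMAS AND PROOFS =====

-- tempered word at absolute stream position p over base state st
def wordAt (st : List Int) (p : Nat) : Int :=
  pyTemper ((pyTwist^[p / 624] st).getD (p % 624) 0)

def resAt (st : List Int) (p : Nat) : Int :=
  PySem.Int.bor (wordAt st p) ((wordAt st (p + 1) >>> 1) <<< 32)

theorem wordAt_shift (st : List Int) (q : Nat) : wordAt st (624 + q) = wordAt (pyTwist st) q := by
  unfold wordAt
  have h1 : (624 + q) / 624 = q / 624 + 1 := by omega
  have h2 : (624 + q) % 624 = q % 624 := by omega
  rw [h1, h2, Function.iterate_succ_apply]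

theorem resAt_shift (st : List Int) (q : Nat) : resAt st (624 + q) = resAt (pyTwist st) q := by
  unfold resAt
  rw [wordAt_shift, show 624 + q + 1 = 624 + (q + 1) by ring, wordAt_shift]

theorem predictLoopA_append (n : Nat) : ∀ (st : List Int) (idx : Nat) (rs : List Int),
    predictLoopA n st idx rs = rs ++ predictLoopA n st idx [] := by
  induction n with
  | zero => intro st idx rs; simp [predictLoopA]
  | succ n ih =>
    intro st idx rs
    simp only [predictLoopA]
    rw [ih, ih _ _ ([] ++ _)]
    simp

theorem map_res_succ (st : List Int) (idx n : Nat) :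
    (List.range (n + 1)).map (fun i => resAt st (idx + 2 * i)) =
      resAt st idx :: (List.range n).map (fun i => resAt st ((idx + 2) + 2 * i)) := by
  rw [List.range_succ_eq_map, List.map_cons, List.map_map]
  rw [List.cons_eq_cons]
  refine ⟨by norm_num, List.map_congr_left ?_⟩
  intro a _
  simp only [Function.comp_apply]
  congr 1
  omega

theorem loopA_eq_map_resAt (n : Nat) : ∀ (st : List Int) (idx : Nat), idx ≤ 624 →
    predictLoopA n st idx [] = (List.range n).map (fun i => resAt st (idx + 2 * i)) := by
  induction n with
  | zero => intro st idx _; simp [predictLoopA]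
  | succ n ih =>
    intro st idx hidx
    rw [map_res_succ]
    simp only [predictLoopA]
    rw [predictLoopA_append, List.nil_append]
    rcases Nat.lt_or_ge idx 623 with h | h
    · -- idx ≤ 622: no twist in either fetch
      rw [if_neg (by omega), if_neg (by omega), ih st (idx + 2) (by omega),
          List.singleton_append, List.cons_eq_cons]
      refine ⟨?_, rfl⟩
      unfold resAt wordAt
      rw [Nat.div_eq_of_lt (by omega : idx < 624), Nat.mod_eq_of_lt (by omega : idx < 624),
          Nat.div_eq_of_lt (by omega : idx + 1 < 624), Nat.mod_eq_of_lt (by omega : idx + 1 < 624)]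
      rfl
    · rcases Nat.lt_or_ge idx 624 with h' | h'
      · -- idx = 623: twist fires before the second fetch
        have he : idx = 623 := by omega
        subst he
        rw [if_neg (by omega), if_pos (by omega), ih (pyTwist st) 1 (by omega)]
        have ht : (fun i : Nat => resAt st ((623 + 2) + 2 * i)) = fun i => resAt (pyTwist st) (1 + 2 * i) := by
          funext i
          rw [show 623 + 2 + 2 * i = 624 + (1 + 2 * i) by ring, resAt_shift]
        rw [ht, List.singleton_append, List.cons_eq_cons]
        refine ⟨?_, rfl⟩
        unfold resAt wordAt
        rw [show (623 : Nat) / 624 = 0 by norm_num, show (623 : Nat) % 624 = 623 by norm_num,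
            show (623 + 1 : Nat) / 624 = 1 by norm_num, show (623 + 1 : Nat) % 624 = 0 by norm_num]
        simp only [Function.iterate_zero_apply, Function.iterate_one]
      · -- idx = 624: twist fires before the first fetch
        have he : idx = 624 := by omega
        subst he
        rw [if_pos (by omega), if_neg (by omega), ih (pyTwist st) 2 (by omega)]
        have ht : (fun i : Nat => resAt st ((624 + 2) + 2 * i)) = fun i => resAt (pyTwist st) (2 + 2 * i) := by
          funext i
          rw [show 624 + 2 + 2 * i = 624 + (2 + 2 * i) by ring, resAt_shift]
        rw [ht, List.singleton_append, List.cons_eq_cons]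
        refine ⟨?_, rfl⟩
        rw [show (624 : Nat) = 624 + 0 from rfl, resAt_shift]
        unfold resAt wordAt
        norm_num [Function.iterate_zero_apply]

theorem blockTableB_eq (nb : Nat) (st : List Int) :
    blockTableB nb st = (List.range (nb + 1)).map (fun k => pyTwist^[k] st) := by
  induction nb with
  | zero => simp [blockTableB]
  | succ n ih =>
    unfold blockTableB at ih ⊢
    rw [List.range_succ, List.foldl_append, ih]
    simp only [List.foldl_cons, List.foldl_nil]
    have hlast : ((List.range (n + 1)).map (fun k => pyTwist^[k] st)).getLastD [] = pyTwist^[n] st := by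
      rw [List.range_succ, List.map_append, List.map_cons, List.map_nil, List.getLastD_concat]
    have hstep : pyTwist (pyTwist^[n] st) = pyTwist^[n + 1] st := (Function.iterate_succ_apply' _ _ _).symm
    rw [hlast, hstep]
    rw [List.range_succ (n := n + 1), List.map_append]
    rfl

theorem blockTableB_getD (nb k : Nat) (st : List Int) (hk : k ≤ nb) :
    (blockTableB nb st).getD k [] = pyTwist^[k] st := by
  rw [blockTableB_eq]
  rw [List.getD_eq_getElem?_getD, List.getElem?_map, List.getElem?_range (by omega)]
  rfl

theorem wordB_eq_wordAt (nb : Nat) (st : List Int) (p : Nat) (hp : p / 624 ≤ nb) :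
    wordB (blockTableB nb st) p = wordAt st p := by
  unfold wordB wordAt
  rw [blockTableB_getD nb (p / 624) st hp]

-- ===== VERDICT (by name: the statement is the Claim_ definition above) =====
theorem predict_after_spec : Claim_equal_predict_after := by
  intro mt_state n_consumed count _ _
  unfold Spec_predict_after predict_after predict_after_alt
  have hmod0 : (0:Int) ≤ PySem.Int.mod (n_consumed * 2) 624 := PySem.Int.mod_nonneg _ (by norm_num)
  have hmodlt : PySem.Int.mod (n_consumed * 2) 624 < 624 := PySem.Int.mod_lt _ (by norm_num)
  set startN := (PySem.Int.mod (n_consumed * 2) 624).toNat with hs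
  have hstart : startN < 624 := by omega
  set st := (List.range (PySem.Int.floordiv (n_consumed * 2) 624).toNat).foldl (fun s _ => pyTwist s) mt_state
  rw [loopA_eq_map_resAt count.toNat st startN (by omega)]
  apply List.map_congr_left
  intro i hi
  rw [List.mem_range] at hi
  have hcpos : 0 < count := by
    by_contra h
    have : count.toNat = 0 := by omega
    omega
  rw [if_pos hcpos]
  have hcnt : 1 ≤ count.toNat := by omega
  have hb0 : (startN + 2 * i) / 624 ≤ (startN + 2 * count.toNat - 1) / 624 :=
    Nat.div_le_div_right (by omega)
  have hb1 : (startN + 2 * i + 1) / 624 ≤ (startN + 2 * count.toNat - 1) / 624 :=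
    Nat.div_le_div_right (by omega)
  rw [wordB_eq_wordAt _ _ _ hb0, wordB_eq_wordAt _ _ _ hb1]
  rfl
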